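-- pv_equiv track=rewrite | github.com/karlcow/shoki | shoki/parsing.py | extract_prose
-- ===== SOURCE A (Python) =====
-- def extract_prose(prose_block):
--     """Extract a structure ready to be formatted.
--
--     Input is a list of dictionaries, one for each topic.
--     the dictionary
--     """
--     discussion = []
--     speaking = False
--     voice = {}
--     description = ""
--     firstline = True
--     for line in prose_block:
--         speaker, sep, text = line.partition(":")
--         if speaker.find(" ") == -1 and not is_link(line):
--             # We are in the speaker section.
--             speaking = True
--             continuation = False
--             if speaker.lower() in ["todo", "action"]:
--                 # This is an action item
--                 voice = extract_todo(speaker, text)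
--             else:
--                 voice = {"speaker": speaker, "said": text.lstrip()}
--         else:
--             # Either intro or continuation line.
--             if not speaking:
--                 if firstline:
--                     description = line
--                     firstline = False
--                 else:
--                     description += " {}".format(line)
--             else:
--                 continuation = True
--                 # this is a continuation line, we add the full line.
--                 voice["said"] += " {}".format(line)
--         if voice and not continuation:
--             discussion.append(voice)
--     return discussion, description
--
-- def extract_todo(flag, text):
--     """Extract an action item line into a dict structure.
--
--     - owner: the owner
--     - todo: the proper action item
--     - deadline: when the action item needs to be executed
--     """
--     owner, action_line = text.split(" to ", 1)
--     todo = action_line.strip()[:-10]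
--     todo_date = action_line.strip()[-10:]
--     return {"owner": owner.strip(),
--             "todo": todo.strip(),
--             "deadline": todo_date}
--
-- def is_link(line):
--     """Identify if a line of prose starts with a link."""
--     if line.startswith('https://') or line.startswith('http://'):
--         return True
--     return False
-- ===== SOURCE B (Python) =====
-- def _make_record(head, text, conts):
--     """Format one grouped block (speaker line + its continuation lines)."""
--     if head.lower() in ("todo", "action"):
--         owner, action_line = text.split(" to ", 1)
--         s = action_line.strip()
--         return {"owner": owner.strip(), "todo": s[:-10].strip(), "deadline": s[-10:]}
--     said = text.lstrip()
--     for c in conts: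
--         said += " " + c
--     return {"speaker": head, "said": said}
--
--
-- def extract_prose(prose_block):
--     """Group lines into (speaker, text, continuations) records, then format them."""
--     intro = []
--     groups = []
--     cur = None
--     for line in prose_block:
--         head, _, text = line.partition(":")
--         if " " not in head and not line.startswith(("https://", "http://")):
--             if cur is not None:
--                 groups.append(cur)
--             cur = (head, text, [])
--         elif cur is not None:
--             cur[2].append(line)
--         else:
--             intro.append(line)
--     if cur is not None:
--         groups.append(cur)
--     return [_make_record(h, t, c) for h, t, c in groups], " ".join(intro)
-- ===== Notes on version B (the rewrite author's own statement) =====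
-- stated objective: alternative
-- what changed: B replaces A's single interleaved state machine (speaking/firstline flags, eager append plus in-place patching of the last appended dict) with a two-phase pass: group lines into (speaker, text, continuations) records and an intro list, then format each finished group and join the intro once.
import Mathlib
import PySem

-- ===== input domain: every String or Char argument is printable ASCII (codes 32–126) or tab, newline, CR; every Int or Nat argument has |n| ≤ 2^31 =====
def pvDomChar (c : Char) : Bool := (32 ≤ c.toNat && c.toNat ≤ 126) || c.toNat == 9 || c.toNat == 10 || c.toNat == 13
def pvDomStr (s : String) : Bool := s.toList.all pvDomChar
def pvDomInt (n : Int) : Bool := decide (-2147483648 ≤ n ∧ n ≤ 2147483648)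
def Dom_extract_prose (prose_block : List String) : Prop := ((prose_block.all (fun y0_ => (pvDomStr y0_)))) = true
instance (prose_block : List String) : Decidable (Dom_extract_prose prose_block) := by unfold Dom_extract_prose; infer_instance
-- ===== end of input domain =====

-- B replaces A's interleaved state machine (flags + eager append and in-place patching of the
-- last appended dict) with a two-phase pass: group lines into records, then format each group.
-- Equivalence is about the return value; neither version mutates its argument.
-- Strings are carried as List Char inside both ports (PySem convention) and converted on return.

-- ===== PORT A =====
-- line.partition(":") — exact for the one-character separator; sep itself is unused by A.
def pvAsplitColon : List Char → List Char × List Char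
  | [] => ([], [])
  | c :: cs =>
    if c = ':' then ([], cs)
    else
      let p := pvAsplitColon cs
      (c :: p.1, p.2)

def pvAisLink (cs : List Char) : Bool :=
  if PySem.Chars.startswith cs "https://".toList || PySem.Chars.startswith cs "http://".toList then
    true
  else
    false

-- extract_todo(flag, text); flag is unused by the Python body.  The two-element unpacking of
-- text.split(" to ", 1) raises ValueError when " to " is absent — those inputs are outside
-- Pre_extract_prose, so the port reads the parts with getD.
def pvAextractTodo (text : List Char) : List (String × List Char) :=
  let parts := PySem.Chars.splitOnMax text " to ".toList 1
  let owner := parts.getD 0 []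
  let action_line := parts.getD 1 []
  let st := PySem.Chars.strip action_line
  let todo := PySem.Chars.slice st none (some (-10))
  let todo_date := PySem.Chars.slice st (some (-10)) none
  [("owner", PySem.Chars.strip owner), ("todo", PySem.Chars.strip todo), ("deadline", todo_date)]

-- voice["said"] += " {}".format(line).  When "said" is absent Python raises KeyError (outside
-- Pre_extract_prose); the total assoc-list update leaves the dict unchanged there.
def pvAupdSaid (voice : List (String × List Char)) (line : List Char) : List (String × List Char) :=
  voice.map (fun kv => if kv.1 = "said" then (kv.1, kv.2 ++ ' ' :: line) else kv)

-- loop state: (discussion, speaking, voice, description, firstline, continuation).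
-- `continuation` is an uninitialised Python local, only ever read after `voice` is non-empty;
-- we carry it as a Bool starting at false.  A appends `voice` to `discussion` and later mutates
-- the same dict in place; the port models the aliasing by rewriting the last list element.
def pvAstep (s : List (List (String × List Char)) × Bool × List (String × List Char) × List Char × Bool × Bool)
    (line : String) :
    List (List (String × List Char)) × Bool × List (String × List Char) × List Char × Bool × Bool :=
  let (discussion, speaking, voice, description, firstline, continuation) := s
  let cs := line.toList
  let (speaker, text) := pvAsplitColon cs
  let (discussion, speaking, voice, description, firstline, continuation) :=
    if PySem.Chars.find speaker [' '] == -1 && !pvAisLink cs then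
      -- speaker section
      let voice :=
        if PySem.Chars.lower speaker ∈ ["todo".toList, "action".toList] then pvAextractTodo text
        else [("speaker", speaker), ("said", PySem.Chars.lstrip text)]
      (discussion, true, voice, description, firstline, false)
    else if !speaking then
      -- intro line
      if firstline then (discussion, speaking, voice, cs, false, continuation)
      else (discussion, speaking, voice, description ++ ' ' :: cs, firstline, continuation)
    else
      -- continuation line: voice aliases discussion's last element, mutation shows in both
      let voice := pvAupdSaid voice cs
      (discussion.dropLast ++ [voice], speaking, voice, description, firstline, true)
  if voice ≠ [] && !continuation then
    (discussion ++ [voice], speaking, voice, description, firstline, continuation)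
  else
    (discussion, speaking, voice, description, firstline, continuation)

def extract_prose (prose_block : List String) : (List (List (String × String))) × String :=
  let s := prose_block.foldl pvAstep ([], false, [], [], true, false)
  (s.1.map (List.map (fun kv => (kv.1, String.ofList kv.2))), String.ofList s.2.2.2.1)

-- ===== PORT B =====
-- head, _, text = line.partition(":") — takeWhile/dropWhile form, exact for a 1-char separator.
def pvBpartitionColon (cs : List Char) : List Char × List Char :=
  (cs.takeWhile (· ≠ ':'), (cs.dropWhile (· ≠ ':')).drop 1)

-- _make_record(head, text, conts); the ValueError of the two-element unpacking is outside
-- Pre_extract_prose, so parts are read with getD.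
def pvBmakeRecord (head text : List Char) (conts : List (List Char)) : List (String × List Char) :=
  if PySem.Chars.lower head ∈ ["todo".toList, "action".toList] then
    let parts := PySem.Chars.splitOnMax text " to ".toList 1
    let owner := parts.getD 0 []
    let action_line := parts.getD 1 []
    let s := PySem.Chars.strip action_line
    [("owner", PySem.Chars.strip owner),
     ("todo", PySem.Chars.strip (PySem.Chars.slice s none (some (-10)))),
     ("deadline", PySem.Chars.slice s (some (-10)) none)]
  else
    [("speaker", head), ("said", conts.foldl (fun a c => a ++ ' ' :: c) (PySem.Chars.lstrip text))]

-- grouping state: (groups, cur, intro)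
def pvBstep (s : List (List Char × List Char × List (List Char)) ×
      Option (List Char × List Char × List (List Char)) × List (List Char))
    (line : String) :
    List (List Char × List Char × List (List Char)) ×
      Option (List Char × List Char × List (List Char)) × List (List Char) :=
  let (groups, cur, intro) := s
  let cs := line.toList
  let (head, text) := pvBpartitionColon cs
  if !PySem.Chars.isIn [' '] head &&
      !(PySem.Chars.startswith cs "https://".toList || PySem.Chars.startswith cs "http://".toList) then
    match cur with
    | some g => (groups ++ [g], some (head, text, []), intro)
    | none => (groups, some (head, text, []), intro)
  else
    match cur with
    | some g => (groups, some (g.1, g.2.1, g.2.2 ++ [cs]), intro)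
    | none => (groups, none, intro ++ [cs])

def extract_prose_alt (prose_block : List String) : (List (List (String × String))) × String :=
  let s := prose_block.foldl pvBstep ([], none, [])
  let groups := match s.2.1 with
    | some g => s.1 ++ [g]
    | none => s.1
  (groups.map (fun g => (pvBmakeRecord g.1 g.2.1 g.2.2).map (fun kv => (kv.1, String.ofList kv.2))),
   String.ofList (PySem.Chars.join [' '] s.2.2))

-- ===== PRECONDITION & SPEC =====
-- spec-level views of a line (independent of both ports)
def pvLineHead (l : String) : List Char := l.toList.takeWhile (· ≠ ':')

def pvLineText (l : String) : List Char := (l.toList.dropWhile (· ≠ ':')).drop 1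

def pvIsSpk (l : String) : Bool :=
  !(PySem.Chars.isIn [' '] (pvLineHead l)) &&
    !(PySem.Chars.startswith l.toList "https://".toList) &&
    !(PySem.Chars.startswith l.toList "http://".toList)

def pvIsTodo (l : String) : Bool :=
  PySem.Chars.lower (pvLineHead l) = "todo".toList || PySem.Chars.lower (pvLineHead l) = "action".toList

-- Pre_ excludes exactly the inputs on which A raises: a todo/action speaker line whose text lacks
-- " to " (ValueError in extract_todo), and a non-speaker line directly after a todo/action speaker
-- line, i.e. a continuation attached to an action item (KeyError on voice["said"]).
def Pre_extract_prose (prose_block : List String) : Prop :=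
  (∀ l ∈ prose_block, pvIsSpk l = true → pvIsTodo l = true →
      PySem.Chars.isIn " to ".toList (pvLineText l) = true) ∧
  ∀ p ∈ prose_block.zip prose_block.tail, pvIsSpk p.1 = true → pvIsTodo p.1 = true → pvIsSpk p.2 = true

instance (prose_block : List String) : Decidable (Pre_extract_prose prose_block) := by
  unfold Pre_extract_prose; infer_instance

def pvWitness_extract_prose : List String :=
  ["intro words", "alice: hi", "more said here", "todo: bob to fix it 2020-01-01"]

def Spec_extract_prose (prose_block : List String) (out : (List (List (String × String))) × String) : Prop := out = extract_prose_alt prose_block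
instance (prose_block : List String) (out : (List (List (String × String))) × String) : Decidable (Spec_extract_prose prose_block out) := by unfold Spec_extract_prose; infer_instance

-- ===== CLAIM (what is proved, stated in full; the proofs are below) =====
def Claim_equal_extract_prose : Prop := ∀ (prose_block : List String), Dom_extract_prose prose_block → Pre_extract_prose prose_block → Spec_extract_prose prose_block (extract_prose prose_block)

-- ===== LEMMAS AND PROOFS =====

-- the record a finished group formats to, and the flushed group list
def pvMk (g : List Char × List Char × List (List Char)) : List (String × List Char) :=
  pvBmakeRecord g.1 g.2.1 g.2.2

def pvFlush (groups : List (List Char × List Char × List (List Char)))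
    (cur : Option (List Char × List Char × List (List Char))) :
    List (List Char × List Char × List (List Char)) :=
  match cur with
  | some g => groups ++ [g]
  | none => groups

-- invariant tying A's loop state to B's loop state
def pvInv (a : List (List (String × List Char)) × Bool × List (String × List Char) × List Char × Bool × Bool)
    (b : List (List Char × List Char × List (List Char)) ×
      Option (List Char × List Char × List (List Char)) × List (List Char)) : Prop :=
  a.1 = (pvFlush b.1 b.2.1).map pvMk ∧
  a.2.1 = b.2.1.isSome ∧
  a.2.2.1 = (match b.2.1 with | some g => pvMk g | none => []) ∧
  a.2.2.2.1 = PySem.Chars.join [' '] b.2.2 ∧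
  a.2.2.2.2.1 = b.2.2.isEmpty

lemma pv_split_eq (cs : List Char) : pvAsplitColon cs = pvBpartitionColon cs := by
  induction cs with
  | nil => rfl
  | cons c cs ih =>
    simp only [pvAsplitColon, pvBpartitionColon] at *
    by_cases h : c = ':' <;> simp [h, ih]

lemma pv_cond_eq (cs : List Char) :
    ((PySem.Chars.find (cs.takeWhile (· ≠ ':')) [' '] == -1) && !pvAisLink cs) =
      (!PySem.Chars.isIn [' '] (cs.takeWhile (· ≠ ':')) &&
        !(PySem.Chars.startswith cs "https://".toList ||
          PySem.Chars.startswith cs "http://".toList)) := by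
  have h1 : (PySem.Chars.find (cs.takeWhile (· ≠ ':')) [' '] == -1) =
      !PySem.Chars.isIn [' '] (cs.takeWhile (· ≠ ':')) := by
    set s := cs.takeWhile (· ≠ ':') with hs
    by_cases h : [' '] <:+: s
    · have e1 := (PySem.Chars.find_ne_neg_one_iff s [' ']).2 h
      have e2 := (PySem.Chars.isIn_iff_infix [' '] s).2 h
      simp [e2, e1]
    · have e1 := (PySem.Chars.find_eq_neg_one_iff s [' ']).2 h
      have e2 := (PySem.Chars.isIn_eq_false_iff [' '] s).2 h
      simp [e2, e1]
  have h2 : pvAisLink cs = (PySem.Chars.startswith cs "https://".toList ||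
      PySem.Chars.startswith cs "http://".toList) := by
    simp [pvAisLink]
  rw [h1, h2]

lemma pv_join_append (xs : List (List Char)) (x : List Char) :
    PySem.Chars.join [' '] (xs ++ [x]) =
      if xs.isEmpty then x else PySem.Chars.join [' '] xs ++ ' ' :: x := by
  induction xs with
  | nil => simp [PySem.Chars.join_singleton]
  | cons y ys ih =>
    cases ys with
    | nil => simp [PySem.Chars.join_cons_cons, PySem.Chars.join_singleton]
    | cons z zs =>
      simp only [List.cons_append, PySem.Chars.join_cons_cons, List.isEmpty_cons] at *
      simp [ih, List.append_assoc]

lemma pv_updSaid_mk (h t : List Char) (c : List (List Char)) (cs : List Char) :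
    pvAupdSaid (pvMk (h, t, c)) cs = pvMk (h, t, c ++ [cs]) := by
  simp only [pvMk, pvBmakeRecord, pvAupdSaid]
  split_ifs <;> simp [List.foldl_append]

lemma pv_mk_ne_nil (g : List Char × List Char × List (List Char)) : pvMk g ≠ [] := by
  obtain ⟨h, t, c⟩ := g
  simp only [pvMk, pvBmakeRecord]
  split_ifs <;> simp

lemma pv_new_voice (h t : List Char) :
    (if PySem.Chars.lower h ∈ ["todo".toList, "action".toList] then pvAextractTodo t
      else [("speaker", h), ("said", PySem.Chars.lstrip t)]) = pvMk (h, t, []) := by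
  simp only [pvMk, pvBmakeRecord, pvAextractTodo]
  split_ifs <;> simp

lemma pv_step_inv (a : List (List (String × List Char)) × Bool × List (String × List Char) × List Char × Bool × Bool)
    (b : List (List Char × List Char × List (List Char)) ×
      Option (List Char × List Char × List (List Char)) × List (List Char))
    (line : String) (hinv : pvInv a b) : pvInv (pvAstep a line) (pvBstep b line) := by
  obtain ⟨disc, speaking, voice, descr, firstline, cont⟩ := a
  obtain ⟨groups, cur, intro⟩ := b
  obtain ⟨h1, h2, h3, h4, h5⟩ := hinv
  simp only at h1 h2 h3 h4 h5
  subst h1 h2 h3 h4 h5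
  simp only [pvAstep, pvBstep, pv_split_eq, pvBpartitionColon, pv_cond_eq, pv_new_voice]
  by_cases hspk : (!PySem.Chars.isIn [' '] (line.toList.takeWhile (· ≠ ':')) &&
      !(PySem.Chars.startswith line.toList "https://".toList ||
        PySem.Chars.startswith line.toList "http://".toList)) = true
  · -- speaker line: A appends a fresh voice, B flushes cur and opens a new group
    rw [hspk]
    cases cur with
    | none =>
      refine ⟨?_, ?_, ?_, ?_, ?_⟩ <;> simp [pv_mk_ne_nil, pvFlush]
    | some g =>
      refine ⟨?_, ?_, ?_, ?_, ?_⟩ <;> simp [pv_mk_ne_nil, pvFlush]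
  · -- non-speaker line
    rw [Bool.not_eq_true] at hspk
    rw [hspk]
    cases cur with
    | none =>
      -- intro line: voice is [], nothing is appended
      by_cases hfl : intro.isEmpty
      · have hi : intro = [] := List.isEmpty_iff.1 hfl
        refine ⟨?_, ?_, ?_, ?_, ?_⟩ <;>
          simp [hi, pvFlush, PySem.Chars.join_singleton]
      · have hfl' : intro.isEmpty = false := by simpa using hfl
        refine ⟨?_, ?_, ?_, ?_, ?_⟩ <;>
          simp [hfl', pvFlush, pv_join_append]
    | some g =>
      -- continuation line: A patches discussion's last element; B extends cur's conts
      obtain ⟨gh, gt, gc⟩ := g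
      refine ⟨?_, ?_, ?_, ?_, ?_⟩ <;>
        simp [pvFlush, pv_updSaid_mk, pv_mk_ne_nil]

lemma pv_fold_inv (prose_block : List String) :
    pvInv (prose_block.foldl pvAstep ([], false, [], [], true, false))
      (prose_block.foldl pvBstep ([], none, [])) := by
  suffices H : ∀ (ls : List String) a b, pvInv a b →
      pvInv (ls.foldl pvAstep a) (ls.foldl pvBstep b) from
    H prose_block _ _ ⟨rfl, rfl, rfl, rfl, rfl⟩
  intro ls
  induction ls with
  | nil => intro a b h; exact h
  | cons l ls ih => intro a b h; exact ih _ _ (pv_step_inv a b l h)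

-- ===== VERDICT (by name: the statement is the Claim_ definition above) =====
theorem extract_prose_spec : Claim_equal_extract_prose := by
  intro prose_block _ _
  unfold Spec_extract_prose extract_prose extract_prose_alt
  obtain ⟨h1, _, _, h4, _⟩ := pv_fold_inv prose_block
  simp only [h1, h4, pvFlush]
  cases (prose_block.foldl pvBstep ([], none, [])).2.1 <;> simp [pvMk]
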